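-- pv_equiv track=rewrite | github.com/mehmet-han/Pardus_Tahta | fatih_projesi_python/server/app/main.py | reverse_cFnc
-- ===== SOURCE A (Python) =====
-- def reverse_cFnc(obfuscated_string: str) -> str:
--     """Reverse the cFnc obfuscation to get the original function code"""
--     if not obfuscated_string:
--         return ""
--
--     # The original replacement map from C# Tools.cFnc()
--     reverse_map = {
--         "!g": "0", "gt": "1", "_a": "2", "me": "3", "?b": "4",
--         "_z": "5", "fi": "6", "+d": "7", "da": "8", "|k": "9",
--         "kz": " ", "?u": ".", "wa": ":"
--     }
--
--     # Extract the core part before the timestamp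
--     if '?' in obfuscated_string:
--         core_part = obfuscated_string.split('?')[0]
--     else:
--         core_part = obfuscated_string
--
--     # Reverse the replacements (longest keys first to avoid conflicts)
--     for key in sorted(reverse_map.keys(), key=len, reverse=True):
--         core_part = core_part.replace(key, reverse_map[key])
--
--     return core_part
-- ===== SOURCE B (Python) =====
-- _REVERSE_MAP = {
--     "!g": "0", "gt": "1", "_a": "2", "me": "3", "?b": "4",
--     "_z": "5", "fi": "6", "+d": "7", "da": "8", "|k": "9",
--     "kz": " ", "?u": ".", "wa": ":",
-- }
--
--
-- def reverse_cFnc(obfuscated_string: str) -> str: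
--     """Reverse the cFnc obfuscation in one left-to-right pass."""
--     core, _sep, _rest = obfuscated_string.partition('?')
--     out = []
--     i = 0
--     n = len(core)
--     while i < n:
--         v = _REVERSE_MAP.get(core[i:i + 2])
--         if v is not None:
--             out.append(v)
--             i += 2
--         else:
--             out.append(core[i])
--             i += 1
--     return ''.join(out)
-- ===== Notes on version B (the rewrite author's own statement) =====
-- stated objective: alternative
-- what changed: Replaces A's 13 sequential str.replace passes over the string (after the same '?'-prefix extraction) by a single left-to-right pass that looks up each two-character window in the reverse map, emitting the mapped character and advancing by 2 on a hit, else copying one character; same result, traded for one traversal instead of thirteen library passes.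
import Mathlib
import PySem

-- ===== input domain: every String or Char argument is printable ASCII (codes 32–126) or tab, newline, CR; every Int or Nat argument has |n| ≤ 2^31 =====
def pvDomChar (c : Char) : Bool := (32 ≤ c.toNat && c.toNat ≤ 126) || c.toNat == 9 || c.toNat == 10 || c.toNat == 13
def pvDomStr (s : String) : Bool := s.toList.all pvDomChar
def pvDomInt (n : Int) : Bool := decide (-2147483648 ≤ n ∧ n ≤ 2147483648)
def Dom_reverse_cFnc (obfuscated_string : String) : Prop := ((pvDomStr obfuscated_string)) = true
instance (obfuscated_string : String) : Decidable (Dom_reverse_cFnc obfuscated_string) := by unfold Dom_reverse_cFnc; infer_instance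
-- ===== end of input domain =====

-- B replaces A's 13 sequential str.replace passes by one left-to-right two-char-window pass (alternative decomposition, same result).

-- ===== PORT A =====
-- the reverse_map dict literal of A
def pvRevMap : PySem.Dict String String :=
  PySem.Dict.ofList [("!g","0"),("gt","1"),("_a","2"),("me","3"),("?b","4"),("_z","5"),("fi","6"),("+d","7"),("da","8"),("|k","9"),("kz"," "),("?u","."),("wa",":")]

def reverse_cFnc (obfuscated_string : String) : String :=
  if obfuscated_string = "" then ""
  else
    let core_part : String :=
      if PySem.Str.isIn "?" obfuscated_string then
        -- obfuscated_string.split('?')[0]: split? is `some` (sep ≠ "") and the list is nonempty, so both getD defaults are unreachable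
        ((PySem.List.pyGet? ((PySem.Str.split? obfuscated_string "?").getD []) 0).getD "")
      else obfuscated_string
    (PySem.List.sorted pvRevMap.keys (fun k => PySem.Str.len k) true).foldl
      (fun core_part key => PySem.Str.replace core_part key ((pvRevMap.get? key).getD "")) core_part

-- ===== PORT B =====
-- the module-level _REVERSE_MAP dict literal of Source B
def pvRevMapAlt : PySem.Dict String String :=
  PySem.Dict.ofList [("!g","0"),("gt","1"),("_a","2"),("me","3"),("?b","4"),("_z","5"),("fi","6"),("+d","7"),("da","8"),("|k","9"),("kz"," "),("?u","."),("wa",":")]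

-- the while loop of Source B: look up core[i:i+2]; on a hit emit the value and advance 2, else emit core[i] and advance 1
def pvDecodeB : List Char → List Char
  | a :: b :: t =>
    match pvRevMapAlt.get? (String.ofList [a, b]) with
    | some v => v.toList ++ pvDecodeB t
    | none => a :: pvDecodeB (b :: t)
  | [c] =>
    -- last position: core[i:i+2] is the 1-char slice [c]
    match pvRevMapAlt.get? (String.ofList [c]) with
    | some v => v.toList
    | none => [c]
  | [] => []

def reverse_cFnc_alt (obfuscated_string : String) : String :=
  -- partition('?')[0] = the characters before the first '?' (hand port, exact)
  String.ofList (pvDecodeB (obfuscated_string.toList.takeWhile (fun c => c ≠ '?')))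

-- ===== PRECONDITION & SPEC =====
def Spec_reverse_cFnc (obfuscated_string : String) (out : String) : Prop := out = reverse_cFnc_alt obfuscated_string
instance (obfuscated_string : String) (out : String) : Decidable (Spec_reverse_cFnc obfuscated_string out) := by unfold Spec_reverse_cFnc; infer_instance

-- ===== CLAIM (what is proved, stated in full; the proofs are below) =====
def Claim_equal_reverse_cFnc : Prop := ∀ (obfuscated_string : String), Dom_reverse_cFnc obfuscated_string → Spec_reverse_cFnc obfuscated_string (reverse_cFnc obfuscated_string)

-- ===== LEMMAS AND PROOFS =====

-- the replacement table as (first char, second char, value char) triples, in A's replace order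
def pvKM : List (Char × Char × Char) := [('!','g','0'),('g','t','1'),('_','a','2'),('m','e','3'),('?','b','4'),('_','z','5'),('f','i','6'),('+','d','7'),('d','a','8'),('|','k','9'),('k','z',' '),('?','u','.'),('w','a',':')]

-- single-key leftmost two-char replacement, the list form of str.replace with a 2-char pattern and 1-char value
def pvRep (x y w : Char) : List Char → List Char
  | a :: b :: t => if a = x ∧ b = y then w :: pvRep x y w t else a :: pvRep x y w (b :: t)
  | l => l

-- A's chain of replaces over a key list
def pvChain (L : List (Char × Char × Char)) (l : List Char) : List Char :=
  L.foldl (fun s e => pvRep e.1 e.2.1 e.2.2 s) l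

lemma pv_rep_cons (x y w a : Char) (u : List Char) (h : a = x → u.head? ≠ some y) :
    pvRep x y w (a :: u) = a :: pvRep x y w u := by
  cases u with
  | nil => rfl
  | cons b t =>
    simp only [pvRep]
    rw [if_neg]
    rintro ⟨rfl, rfl⟩
    exact h rfl rfl

lemma pv_rep_head (x y w : Char) (t : List Char) :
    (pvRep x y w t).head? = t.head? ∨ (pvRep x y w t).head? = some w := by
  match t with
  | [] => exact Or.inl rfl
  | [c] => exact Or.inl rfl
  | a :: b :: t' =>
    simp only [pvRep]
    split_ifs with hc
    · exact Or.inr rfl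
    · exact Or.inl rfl

lemma pv_rep_nil (x y w : Char) : pvRep x y w [] = [] := rfl

lemma pv_rep_single (x y w c : Char) : pvRep x y w [c] = [c] := rfl

lemma pv_chain_nil (L : List (Char × Char × Char)) : pvChain L [] = [] := by
  induction L with
  | nil => rfl
  | cons k L ih => simpa only [pvChain, List.foldl_cons, pv_rep_nil] using ih

lemma pv_chain_single (L : List (Char × Char × Char)) (c : Char) : pvChain L [c] = [c] := by
  induction L with
  | nil => rfl
  | cons k L ih => simpa only [pvChain, List.foldl_cons, pv_rep_single] using ih

lemma pv_chain_cons (L : List (Char × Char × Char)) : ∀ (a : Char) (t : List Char),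
    (∀ e ∈ L, ∀ f ∈ L, e.2.1 ≠ f.2.2) →
    (∀ e ∈ L, e.1 = a → t.head? ≠ some e.2.1) →
    pvChain L (a :: t) = a :: pvChain L t := by
  induction L with
  | nil => intros; rfl
  | cons k L ih =>
    intro a t hv ha
    have h1 : pvRep k.1 k.2.1 k.2.2 (a :: t) = a :: pvRep k.1 k.2.1 k.2.2 t :=
      pv_rep_cons _ _ _ _ _ (fun hx => ha k (List.mem_cons_self ..) hx.symm)
    simp only [pvChain, List.foldl_cons, h1]
    exact ih a (pvRep k.1 k.2.1 k.2.2 t)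
      (fun e he f hf => hv e (List.mem_cons_of_mem _ he) f (List.mem_cons_of_mem _ hf))
      (fun e he hx hcontra => by
        rcases pv_rep_head k.1 k.2.1 k.2.2 t with hh | hh
        · exact ha e (List.mem_cons_of_mem _ he) hx (hh ▸ hcontra)
        · have : k.2.2 = e.2.1 := Option.some.inj (hh ▸ hcontra)
          exact hv e (List.mem_cons_of_mem _ he) k (List.mem_cons_self ..) this.symm)

lemma pv_chain_cons2 (L : List (Char × Char × Char)) (a b : Char) :
    ∀ (t : List Char), (∀ e ∈ L, e.1 ≠ b ∧ ¬(e.1 = a ∧ e.2.1 = b)) →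
    pvChain L (a :: b :: t) = a :: b :: pvChain L t := by
  induction L with
  | nil => intros; rfl
  | cons k L ih =>
    intro t h
    have h1 : pvRep k.1 k.2.1 k.2.2 (a :: b :: t) = a :: pvRep k.1 k.2.1 k.2.2 (b :: t) :=
      pv_rep_cons _ _ _ _ _ (fun hx hy => (h k (List.mem_cons_self ..)).2
        ⟨hx.symm, (Option.some.inj hy).symm⟩)
    have h2 : pvRep k.1 k.2.1 k.2.2 (b :: t) = b :: pvRep k.1 k.2.1 k.2.2 t :=
      pv_rep_cons _ _ _ _ _ (fun hx => absurd hx.symm (h k (List.mem_cons_self ..)).1)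
    simp only [pvChain, List.foldl_cons, h1, h2]
    exact ih (pvRep k.1 k.2.1 k.2.2 t) (fun e he => h e (List.mem_cons_of_mem _ he))

lemma pv_chain_step (L1 L2 : List (Char × Char × Char)) (x y w : Char) (u : List Char)
    (h1 : ∀ e ∈ L1, e.1 ≠ y ∧ ¬(e.1 = x ∧ e.2.1 = y))
    (hv : ∀ e ∈ L2, ∀ f ∈ L2, e.2.1 ≠ f.2.2)
    (h2 : ∀ e ∈ L2, e.1 ≠ w) :
    pvChain (L1 ++ (x, y, w) :: L2) (x :: y :: u) = w :: pvChain (L1 ++ (x, y, w) :: L2) u := by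
  have hsplit : ∀ s : List Char, pvChain (L1 ++ (x, y, w) :: L2) s
      = pvChain L2 (pvRep x y w (pvChain L1 s)) := by
    intro s; simp only [pvChain, List.foldl_append, List.foldl_cons]
  rw [hsplit, hsplit, pv_chain_cons2 L1 x y u h1]
  have hx : pvRep x y w (x :: y :: pvChain L1 u) = w :: pvRep x y w (pvChain L1 u) := by
    simp [pvRep]
  rw [hx]
  exact pv_chain_cons L2 w (pvRep x y w (pvChain L1 u)) hv
    (fun e he hx' _ => absurd hx' (h2 e he))

lemma pv_getB1 (c : Char) : pvRevMapAlt.get? (String.ofList [c]) = none := by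
  simp [show pvRevMapAlt = PySem.Dict.mk [("!g","0"),("gt","1"),("_a","2"),("me","3"),("?b","4"),("_z","5"),("fi","6"),("+d","7"),("da","8"),("|k","9"),("kz"," "),("?u","."),("wa",":")] from rfl,
    PySem.Dict.get?_mk_cons, beq_iff_eq, String.ext_iff, PySem.Dict.get?]

theorem pv_chain_eq_decode : ∀ l : List Char, pvChain pvKM l = pvDecodeB l
  | [] => by rw [pv_chain_nil]; rfl
  | [c] => by rw [pv_chain_single]; simp only [pvDecodeB, pv_getB1]
  | a :: b :: u => by
    cases hget : pvRevMapAlt.get? (String.ofList [a, b]) with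
    | some v =>
      have h := hget
      rw [show pvRevMapAlt = PySem.Dict.mk [("!g","0"),("gt","1"),("_a","2"),("me","3"),("?b","4"),("_z","5"),("fi","6"),("+d","7"),("da","8"),("|k","9"),("kz"," "),("?u","."),("wa",":")] from rfl] at h
      simp only [PySem.Dict.get?_mk_cons, beq_iff_eq] at h
      by_cases h1 : "!g" = String.ofList [a, b]
      · rw [if_pos h1] at h
        obtain ⟨rfl, rfl⟩ : a = '!' ∧ b = 'g' := by
          have hl := congrArg String.toList h1; simp at hl; exact ⟨hl.1.symm, hl.2.symm⟩
        obtain rfl : v = "0" := (Option.some.inj h).symm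
        have hK : pvKM = [] ++ ('!','g','0') :: [('g','t','1'),('_','a','2'),('m','e','3'),('?','b','4'),('_','z','5'),('f','i','6'),('+','d','7'),('d','a','8'),('|','k','9'),('k','z',' '),('?','u','.'),('w','a',':')] := rfl
        have hstep : pvChain pvKM ('!' :: 'g' :: u) = '0' :: pvChain pvKM u := by
          rw [hK]; exact pv_chain_step _ _ _ _ _ _ (by decide) (by decide) (by decide)
        rw [hstep, pv_chain_eq_decode u]
        simp only [pvDecodeB, hget]
        try rfl
      · rw [if_neg h1] at h
        by_cases h2 : "gt" = String.ofList [a, b]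
        · rw [if_pos h2] at h
          obtain ⟨rfl, rfl⟩ : a = 'g' ∧ b = 't' := by
            have hl := congrArg String.toList h2; simp at hl; exact ⟨hl.1.symm, hl.2.symm⟩
          obtain rfl : v = "1" := (Option.some.inj h).symm
          have hK : pvKM = [('!','g','0')] ++ ('g','t','1') :: [('_','a','2'),('m','e','3'),('?','b','4'),('_','z','5'),('f','i','6'),('+','d','7'),('d','a','8'),('|','k','9'),('k','z',' '),('?','u','.'),('w','a',':')] := rfl
          have hstep : pvChain pvKM ('g' :: 't' :: u) = '1' :: pvChain pvKM u := by
            rw [hK]; exact pv_chain_step _ _ _ _ _ _ (by decide) (by decide) (by decide)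
          rw [hstep, pv_chain_eq_decode u]
          simp only [pvDecodeB, hget]
          try rfl
        · rw [if_neg h2] at h
          by_cases h3 : "_a" = String.ofList [a, b]
          · rw [if_pos h3] at h
            obtain ⟨rfl, rfl⟩ : a = '_' ∧ b = 'a' := by
              have hl := congrArg String.toList h3; simp at hl; exact ⟨hl.1.symm, hl.2.symm⟩
            obtain rfl : v = "2" := (Option.some.inj h).symm
            have hK : pvKM = [('!','g','0'),('g','t','1')] ++ ('_','a','2') :: [('m','e','3'),('?','b','4'),('_','z','5'),('f','i','6'),('+','d','7'),('d','a','8'),('|','k','9'),('k','z',' '),('?','u','.'),('w','a',':')] := rfl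
            have hstep : pvChain pvKM ('_' :: 'a' :: u) = '2' :: pvChain pvKM u := by
              rw [hK]; exact pv_chain_step _ _ _ _ _ _ (by decide) (by decide) (by decide)
            rw [hstep, pv_chain_eq_decode u]
            simp only [pvDecodeB, hget]
            try rfl
          · rw [if_neg h3] at h
            by_cases h4 : "me" = String.ofList [a, b]
            · rw [if_pos h4] at h
              obtain ⟨rfl, rfl⟩ : a = 'm' ∧ b = 'e' := by
                have hl := congrArg String.toList h4; simp at hl; exact ⟨hl.1.symm, hl.2.symm⟩
              obtain rfl : v = "3" := (Option.some.inj h).symm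
              have hK : pvKM = [('!','g','0'),('g','t','1'),('_','a','2')] ++ ('m','e','3') :: [('?','b','4'),('_','z','5'),('f','i','6'),('+','d','7'),('d','a','8'),('|','k','9'),('k','z',' '),('?','u','.'),('w','a',':')] := rfl
              have hstep : pvChain pvKM ('m' :: 'e' :: u) = '3' :: pvChain pvKM u := by
                rw [hK]; exact pv_chain_step _ _ _ _ _ _ (by decide) (by decide) (by decide)
              rw [hstep, pv_chain_eq_decode u]
              simp only [pvDecodeB, hget]
              try rfl
            · rw [if_neg h4] at h
              by_cases h5 : "?b" = String.ofList [a, b]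
              · rw [if_pos h5] at h
                obtain ⟨rfl, rfl⟩ : a = '?' ∧ b = 'b' := by
                  have hl := congrArg String.toList h5; simp at hl; exact ⟨hl.1.symm, hl.2.symm⟩
                obtain rfl : v = "4" := (Option.some.inj h).symm
                have hK : pvKM = [('!','g','0'),('g','t','1'),('_','a','2'),('m','e','3')] ++ ('?','b','4') :: [('_','z','5'),('f','i','6'),('+','d','7'),('d','a','8'),('|','k','9'),('k','z',' '),('?','u','.'),('w','a',':')] := rfl
                have hstep : pvChain pvKM ('?' :: 'b' :: u) = '4' :: pvChain pvKM u := by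
                  rw [hK]; exact pv_chain_step _ _ _ _ _ _ (by decide) (by decide) (by decide)
                rw [hstep, pv_chain_eq_decode u]
                simp only [pvDecodeB, hget]
                try rfl
              · rw [if_neg h5] at h
                by_cases h6 : "_z" = String.ofList [a, b]
                · rw [if_pos h6] at h
                  obtain ⟨rfl, rfl⟩ : a = '_' ∧ b = 'z' := by
                    have hl := congrArg String.toList h6; simp at hl; exact ⟨hl.1.symm, hl.2.symm⟩
                  obtain rfl : v = "5" := (Option.some.inj h).symm
                  have hK : pvKM = [('!','g','0'),('g','t','1'),('_','a','2'),('m','e','3'),('?','b','4')] ++ ('_','z','5') :: [('f','i','6'),('+','d','7'),('d','a','8'),('|','k','9'),('k','z',' '),('?','u','.'),('w','a',':')] := rfl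
                  have hstep : pvChain pvKM ('_' :: 'z' :: u) = '5' :: pvChain pvKM u := by
                    rw [hK]; exact pv_chain_step _ _ _ _ _ _ (by decide) (by decide) (by decide)
                  rw [hstep, pv_chain_eq_decode u]
                  simp only [pvDecodeB, hget]
                  try rfl
                · rw [if_neg h6] at h
                  by_cases h7 : "fi" = String.ofList [a, b]
                  · rw [if_pos h7] at h
                    obtain ⟨rfl, rfl⟩ : a = 'f' ∧ b = 'i' := by
                      have hl := congrArg String.toList h7; simp at hl; exact ⟨hl.1.symm, hl.2.symm⟩
                    obtain rfl : v = "6" := (Option.some.inj h).symm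
                    have hK : pvKM = [('!','g','0'),('g','t','1'),('_','a','2'),('m','e','3'),('?','b','4'),('_','z','5')] ++ ('f','i','6') :: [('+','d','7'),('d','a','8'),('|','k','9'),('k','z',' '),('?','u','.'),('w','a',':')] := rfl
                    have hstep : pvChain pvKM ('f' :: 'i' :: u) = '6' :: pvChain pvKM u := by
                      rw [hK]; exact pv_chain_step _ _ _ _ _ _ (by decide) (by decide) (by decide)
                    rw [hstep, pv_chain_eq_decode u]
                    simp only [pvDecodeB, hget]
                    try rfl
                  · rw [if_neg h7] at h
                    by_cases h8 : "+d" = String.ofList [a, b]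
                    · rw [if_pos h8] at h
                      obtain ⟨rfl, rfl⟩ : a = '+' ∧ b = 'd' := by
                        have hl := congrArg String.toList h8; simp at hl; exact ⟨hl.1.symm, hl.2.symm⟩
                      obtain rfl : v = "7" := (Option.some.inj h).symm
                      have hK : pvKM = [('!','g','0'),('g','t','1'),('_','a','2'),('m','e','3'),('?','b','4'),('_','z','5'),('f','i','6')] ++ ('+','d','7') :: [('d','a','8'),('|','k','9'),('k','z',' '),('?','u','.'),('w','a',':')] := rfl
                      have hstep : pvChain pvKM ('+' :: 'd' :: u) = '7' :: pvChain pvKM u := by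
                        rw [hK]; exact pv_chain_step _ _ _ _ _ _ (by decide) (by decide) (by decide)
                      rw [hstep, pv_chain_eq_decode u]
                      simp only [pvDecodeB, hget]
                      try rfl
                    · rw [if_neg h8] at h
                      by_cases h9 : "da" = String.ofList [a, b]
                      · rw [if_pos h9] at h
                        obtain ⟨rfl, rfl⟩ : a = 'd' ∧ b = 'a' := by
                          have hl := congrArg String.toList h9; simp at hl; exact ⟨hl.1.symm, hl.2.symm⟩
                        obtain rfl : v = "8" := (Option.some.inj h).symm
                        have hK : pvKM = [('!','g','0'),('g','t','1'),('_','a','2'),('m','e','3'),('?','b','4'),('_','z','5'),('f','i','6'),('+','d','7')] ++ ('d','a','8') :: [('|','k','9'),('k','z',' '),('?','u','.'),('w','a',':')] := rfl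
                        have hstep : pvChain pvKM ('d' :: 'a' :: u) = '8' :: pvChain pvKM u := by
                          rw [hK]; exact pv_chain_step _ _ _ _ _ _ (by decide) (by decide) (by decide)
                        rw [hstep, pv_chain_eq_decode u]
                        simp only [pvDecodeB, hget]
                        try rfl
                      · rw [if_neg h9] at h
                        by_cases h10 : "|k" = String.ofList [a, b]
                        · rw [if_pos h10] at h
                          obtain ⟨rfl, rfl⟩ : a = '|' ∧ b = 'k' := by
                            have hl := congrArg String.toList h10; simp at hl; exact ⟨hl.1.symm, hl.2.symm⟩
                          obtain rfl : v = "9" := (Option.some.inj h).symm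
                          have hK : pvKM = [('!','g','0'),('g','t','1'),('_','a','2'),('m','e','3'),('?','b','4'),('_','z','5'),('f','i','6'),('+','d','7'),('d','a','8')] ++ ('|','k','9') :: [('k','z',' '),('?','u','.'),('w','a',':')] := rfl
                          have hstep : pvChain pvKM ('|' :: 'k' :: u) = '9' :: pvChain pvKM u := by
                            rw [hK]; exact pv_chain_step _ _ _ _ _ _ (by decide) (by decide) (by decide)
                          rw [hstep, pv_chain_eq_decode u]
                          simp only [pvDecodeB, hget]
                          try rfl
                        · rw [if_neg h10] at h
                          by_cases h11 : "kz" = String.ofList [a, b]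
                          · rw [if_pos h11] at h
                            obtain ⟨rfl, rfl⟩ : a = 'k' ∧ b = 'z' := by
                              have hl := congrArg String.toList h11; simp at hl; exact ⟨hl.1.symm, hl.2.symm⟩
                            obtain rfl : v = " " := (Option.some.inj h).symm
                            have hK : pvKM = [('!','g','0'),('g','t','1'),('_','a','2'),('m','e','3'),('?','b','4'),('_','z','5'),('f','i','6'),('+','d','7'),('d','a','8'),('|','k','9')] ++ ('k','z',' ') :: [('?','u','.'),('w','a',':')] := rfl
                            have hstep : pvChain pvKM ('k' :: 'z' :: u) = ' ' :: pvChain pvKM u := by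
                              rw [hK]; exact pv_chain_step _ _ _ _ _ _ (by decide) (by decide) (by decide)
                            rw [hstep, pv_chain_eq_decode u]
                            simp only [pvDecodeB, hget]
                            try rfl
                          · rw [if_neg h11] at h
                            by_cases h12 : "?u" = String.ofList [a, b]
                            · rw [if_pos h12] at h
                              obtain ⟨rfl, rfl⟩ : a = '?' ∧ b = 'u' := by
                                have hl := congrArg String.toList h12; simp at hl; exact ⟨hl.1.symm, hl.2.symm⟩
                              obtain rfl : v = "." := (Option.some.inj h).symm
                              have hK : pvKM = [('!','g','0'),('g','t','1'),('_','a','2'),('m','e','3'),('?','b','4'),('_','z','5'),('f','i','6'),('+','d','7'),('d','a','8'),('|','k','9'),('k','z',' ')] ++ ('?','u','.') :: [('w','a',':')] := rfl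
                              have hstep : pvChain pvKM ('?' :: 'u' :: u) = '.' :: pvChain pvKM u := by
                                rw [hK]; exact pv_chain_step _ _ _ _ _ _ (by decide) (by decide) (by decide)
                              rw [hstep, pv_chain_eq_decode u]
                              simp only [pvDecodeB, hget]
                              try rfl
                            · rw [if_neg h12] at h
                              by_cases h13 : "wa" = String.ofList [a, b]
                              · rw [if_pos h13] at h
                                obtain ⟨rfl, rfl⟩ : a = 'w' ∧ b = 'a' := by
                                  have hl := congrArg String.toList h13; simp at hl; exact ⟨hl.1.symm, hl.2.symm⟩
                                obtain rfl : v = ":" := (Option.some.inj h).symm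
                                have hK : pvKM = [('!','g','0'),('g','t','1'),('_','a','2'),('m','e','3'),('?','b','4'),('_','z','5'),('f','i','6'),('+','d','7'),('d','a','8'),('|','k','9'),('k','z',' '),('?','u','.')] ++ ('w','a',':') :: [] := rfl
                                have hstep : pvChain pvKM ('w' :: 'a' :: u) = ':' :: pvChain pvKM u := by
                                  rw [hK]; exact pv_chain_step _ _ _ _ _ _ (by decide) (by decide) (by decide)
                                rw [hstep, pv_chain_eq_decode u]
                                simp only [pvDecodeB, hget]
                                try rfl
                              · rw [if_neg h13] at h
                                simp [PySem.Dict.get?] at h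
    | none =>
      have h := hget
      rw [show pvRevMapAlt = PySem.Dict.mk [("!g","0"),("gt","1"),("_a","2"),("me","3"),("?b","4"),("_z","5"),("fi","6"),("+d","7"),("da","8"),("|k","9"),("kz"," "),("?u","."),("wa",":")] from rfl] at h
      simp only [PySem.Dict.get?_mk_cons, beq_iff_eq] at h
      by_cases h1 : "!g" = String.ofList [a, b]
      · rw [if_pos h1] at h
        exact absurd h (Option.some_ne_none _)
      · rw [if_neg h1] at h
        by_cases h2 : "gt" = String.ofList [a, b]
        · rw [if_pos h2] at h
          exact absurd h (Option.some_ne_none _)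
        · rw [if_neg h2] at h
          by_cases h3 : "_a" = String.ofList [a, b]
          · rw [if_pos h3] at h
            exact absurd h (Option.some_ne_none _)
          · rw [if_neg h3] at h
            by_cases h4 : "me" = String.ofList [a, b]
            · rw [if_pos h4] at h
              exact absurd h (Option.some_ne_none _)
            · rw [if_neg h4] at h
              by_cases h5 : "?b" = String.ofList [a, b]
              · rw [if_pos h5] at h
                exact absurd h (Option.some_ne_none _)
              · rw [if_neg h5] at h
                by_cases h6 : "_z" = String.ofList [a, b]
                · rw [if_pos h6] at h
                  exact absurd h (Option.some_ne_none _)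
                · rw [if_neg h6] at h
                  by_cases h7 : "fi" = String.ofList [a, b]
                  · rw [if_pos h7] at h
                    exact absurd h (Option.some_ne_none _)
                  · rw [if_neg h7] at h
                    by_cases h8 : "+d" = String.ofList [a, b]
                    · rw [if_pos h8] at h
                      exact absurd h (Option.some_ne_none _)
                    · rw [if_neg h8] at h
                      by_cases h9 : "da" = String.ofList [a, b]
                      · rw [if_pos h9] at h
                        exact absurd h (Option.some_ne_none _)
                      · rw [if_neg h9] at h
                        by_cases h10 : "|k" = String.ofList [a, b]
                        · rw [if_pos h10] at h
                          exact absurd h (Option.some_ne_none _)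
                        · rw [if_neg h10] at h
                          by_cases h11 : "kz" = String.ofList [a, b]
                          · rw [if_pos h11] at h
                            exact absurd h (Option.some_ne_none _)
                          · rw [if_neg h11] at h
                            by_cases h12 : "?u" = String.ofList [a, b]
                            · rw [if_pos h12] at h
                              exact absurd h (Option.some_ne_none _)
                            · rw [if_neg h12] at h
                              by_cases h13 : "wa" = String.ofList [a, b]
                              · rw [if_pos h13] at h
                                exact absurd h (Option.some_ne_none _)
                              · rw [if_neg h13] at h
                                have hcons : pvChain pvKM (a :: b :: u) = a :: pvChain pvKM (b :: u) := by
                                  refine pv_chain_cons pvKM a (b :: u) (by decide) ?_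
                                  intro e he
                                  fin_cases he
                                  · intro hx hy; simp only [List.head?_cons, Option.some.injEq] at hy; exact h1 (by rw [← hx, hy])
                                  · intro hx hy; simp only [List.head?_cons, Option.some.injEq] at hy; exact h2 (by rw [← hx, hy])
                                  · intro hx hy; simp only [List.head?_cons, Option.some.injEq] at hy; exact h3 (by rw [← hx, hy])
                                  · intro hx hy; simp only [List.head?_cons, Option.some.injEq] at hy; exact h4 (by rw [← hx, hy])
                                  · intro hx hy; simp only [List.head?_cons, Option.some.injEq] at hy; exact h5 (by rw [← hx, hy])
                                  · intro hx hy; simp only [List.head?_cons, Option.some.injEq] at hy; exact h6 (by rw [← hx, hy])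
                                  · intro hx hy; simp only [List.head?_cons, Option.some.injEq] at hy; exact h7 (by rw [← hx, hy])
                                  · intro hx hy; simp only [List.head?_cons, Option.some.injEq] at hy; exact h8 (by rw [← hx, hy])
                                  · intro hx hy; simp only [List.head?_cons, Option.some.injEq] at hy; exact h9 (by rw [← hx, hy])
                                  · intro hx hy; simp only [List.head?_cons, Option.some.injEq] at hy; exact h10 (by rw [← hx, hy])
                                  · intro hx hy; simp only [List.head?_cons, Option.some.injEq] at hy; exact h11 (by rw [← hx, hy])
                                  · intro hx hy; simp only [List.head?_cons, Option.some.injEq] at hy; exact h12 (by rw [← hx, hy])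
                                  · intro hx hy; simp only [List.head?_cons, Option.some.injEq] at hy; exact h13 (by rw [← hx, hy])
                                rw [hcons, pv_chain_eq_decode (b :: u)]
                                simp only [pvDecodeB, hget]
termination_by l => l.length

-- one str.replace with a 2-char key and 1-char value, reduced to pvRep
lemma pv_replace2 (x y w : Char) (l : List Char) :
    PySem.Chars.replace l [x, y] [w] = pvRep x y w l := by
  have go2 : ∀ (fuel : Nat) (t acc : List Char), t.length ≤ fuel →
      PySem.Chars.replace.go [x, y] [w] fuel t acc = acc.reverse ++ pvRep x y w t := by
    intro fuel
    induction fuel with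
    | zero =>
      intro t acc h
      have ht : t = [] := List.eq_nil_of_length_eq_zero (by omega)
      subst ht
      rw [show PySem.Chars.replace.go [x, y] [w] 0 [] acc = acc.reverse ++ [] from rfl]
      simp [pv_rep_nil]
    | succ n ih =>
      intro t acc h
      match t with
      | [] =>
        rw [show PySem.Chars.replace.go [x, y] [w] (n+1) [] acc = acc.reverse from rfl]
        simp [pv_rep_nil]
      | [c] =>
        rw [show PySem.Chars.replace.go [x, y] [w] (n+1) [c] acc
          = if [x, y].isPrefixOf [c] then
              PySem.Chars.replace.go [x, y] [w] n (List.drop 2 [c]) ([w].reverse ++ acc)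
            else PySem.Chars.replace.go [x, y] [w] n [] (c :: acc) from rfl]
        rw [if_neg (by simp [List.isPrefixOf])]
        rw [ih [] (c :: acc) (by simp)]
        simp [pv_rep_nil, pv_rep_single]
      | c :: d :: t'' =>
        rw [show PySem.Chars.replace.go [x, y] [w] (n+1) (c :: d :: t'') acc
          = if [x, y].isPrefixOf (c :: d :: t'') then
              PySem.Chars.replace.go [x, y] [w] n t'' ([w].reverse ++ acc)
            else PySem.Chars.replace.go [x, y] [w] n (d :: t'') (c :: acc) from rfl]
        by_cases hm : x = c ∧ y = d
        · obtain ⟨rfl, rfl⟩ := hm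
          rw [if_pos (by simp [List.isPrefixOf])]
          rw [ih t'' ([w].reverse ++ acc) (by simp at h ⊢; omega)]
          simp [pvRep]
        · rw [if_neg (by simp only [List.isPrefixOf, List.isPrefixOf_nil_left,
            Bool.and_true, Bool.and_eq_true, beq_iff_eq, not_and]; exact fun h1 h2 => hm ⟨h1, h2⟩)]
          rw [ih (d :: t'') (c :: acc) (by simp at h ⊢; omega)]
          have hr : pvRep x y w (c :: d :: t'') = c :: pvRep x y w (d :: t'') := by
            simp only [pvRep]
            rw [if_neg (fun hc => hm ⟨hc.1.symm, hc.2.symm⟩)]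
          rw [hr]
          simp
  rw [PySem.Chars.replace]
  rw [if_neg (by simp)]
  simpa using go2 l.length l [] le_rfl

lemma pv_repl (k vv : String) (x y w : Char) (hk : k.toList = [x, y]) (hv : vv.toList = [w])
    (t : String) : PySem.Str.replace t k vv = String.ofList (pvRep x y w t.toList) := by
  rw [PySem.Str.replace, hk, hv, pv_replace2]

-- the whole sorted-keys replace fold of A, reduced to pvChain
lemma pv_foldA (cp : String) :
    (PySem.List.sorted pvRevMap.keys (fun k => PySem.Str.len k) true).foldl
      (fun core_part key => PySem.Str.replace core_part key ((pvRevMap.get? key).getD "")) cp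
    = String.ofList (pvChain pvKM cp.toList) := by
  have hsort : PySem.List.sorted pvRevMap.keys (fun k => PySem.Str.len k) true
      = ["!g","gt","_a","me","?b","_z","fi","+d","da","|k","kz","?u","wa"] := by decide
  rw [hsort]
  simp only [List.foldl_cons, List.foldl_nil]
  rw [pv_repl "!g" ((pvRevMap.get? "!g").getD "") '!' 'g' '0' rfl rfl]
  rw [pv_repl "gt" ((pvRevMap.get? "gt").getD "") 'g' 't' '1' rfl rfl]
  rw [pv_repl "_a" ((pvRevMap.get? "_a").getD "") '_' 'a' '2' rfl rfl]
  rw [pv_repl "me" ((pvRevMap.get? "me").getD "") 'm' 'e' '3' rfl rfl]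
  rw [pv_repl "?b" ((pvRevMap.get? "?b").getD "") '?' 'b' '4' rfl rfl]
  rw [pv_repl "_z" ((pvRevMap.get? "_z").getD "") '_' 'z' '5' rfl rfl]
  rw [pv_repl "fi" ((pvRevMap.get? "fi").getD "") 'f' 'i' '6' rfl rfl]
  rw [pv_repl "+d" ((pvRevMap.get? "+d").getD "") '+' 'd' '7' rfl rfl]
  rw [pv_repl "da" ((pvRevMap.get? "da").getD "") 'd' 'a' '8' rfl rfl]
  rw [pv_repl "|k" ((pvRevMap.get? "|k").getD "") '|' 'k' '9' rfl rfl]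
  rw [pv_repl "kz" ((pvRevMap.get? "kz").getD "") 'k' 'z' ' ' rfl rfl]
  rw [pv_repl "?u" ((pvRevMap.get? "?u").getD "") '?' 'u' '.' rfl rfl]
  rw [pv_repl "wa" ((pvRevMap.get? "wa").getD "") 'w' 'a' ':' rfl rfl]
  simp only [String.toList_ofList]
  simp only [pvChain, pvKM, List.foldl_cons, List.foldl_nil]

-- the first piece of s.split('?') is the prefix before the first '?'
lemma pv_splitgo : ∀ (fuel : Nat) (l cur : List Char) (acc : List (List Char)), l.length ≤ fuel →
    ∃ rest, PySem.Chars.splitOn.go ['?'] fuel l cur acc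
      = acc.reverse ++ (cur.reverse ++ l.takeWhile (fun c => c ≠ '?')) :: rest := by
  intro fuel
  induction fuel with
  | zero =>
    intro l cur acc h
    have hl : l = [] := List.eq_nil_of_length_eq_zero (by omega)
    subst hl
    rw [show PySem.Chars.splitOn.go ['?'] 0 [] cur acc = ((cur.reverse ++ []) :: acc).reverse from rfl]
    exact ⟨[], by simp⟩
  | succ n ih =>
    intro l cur acc h
    cases l with
    | nil =>
      rw [show PySem.Chars.splitOn.go ['?'] (n+1) [] cur acc = (cur.reverse :: acc).reverse from rfl]
      exact ⟨[], by simp⟩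
    | cons c t =>
      rw [show PySem.Chars.splitOn.go ['?'] (n+1) (c :: t) cur acc
        = if ['?'].isPrefixOf (c :: t) then
            PySem.Chars.splitOn.go ['?'] n (List.drop 1 (c :: t)) [] (cur.reverse :: acc)
          else PySem.Chars.splitOn.go ['?'] n t (c :: cur) acc from rfl]
      by_cases hc : c = '?'
      · subst hc
        rw [if_pos (by simp [List.isPrefixOf])]
        obtain ⟨rest, hr⟩ := ih t [] ((cur.reverse : List Char) :: acc) (by simp at h ⊢; omega)
        refine ⟨(t.takeWhile (fun c => c ≠ '?')) :: rest, ?_⟩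
        rw [show List.drop 1 ('?' :: t) = t from rfl, hr]
        simp [List.takeWhile]
      · rw [if_neg (by simp only [List.isPrefixOf, List.isPrefixOf_nil_left,
          Bool.and_true, Bool.and_eq_true, beq_iff_eq]; exact fun h' => absurd h'.symm hc)]
        obtain ⟨rest, hr⟩ := ih t (c :: cur) acc (by simp at h ⊢; omega)
        refine ⟨rest, ?_⟩
        rw [hr]
        have htw : (c :: t).takeWhile (fun c => c ≠ '?') = c :: t.takeWhile (fun c => c ≠ '?') := by
          simp [List.takeWhile, hc]
        rw [htw]
        simp

lemma pv_split_first (s : String) : ∃ p0 ps, PySem.Str.split? s "?" = some (p0 :: ps)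
    ∧ p0.toList = s.toList.takeWhile (fun c => c ≠ '?') := by
  obtain ⟨rest, hr⟩ := pv_splitgo (s.toList.length + 1) s.toList [] [] (by omega)
  refine ⟨String.ofList (s.toList.takeWhile (fun c => c ≠ '?')), rest.map String.ofList, ?_, ?_⟩
  · rw [PySem.Str.split?, PySem.Chars.split?]
    rw [if_neg (by simp)]
    rw [show ("?" : String).toList = ['?'] from rfl]
    rw [PySem.Chars.splitOn, hr]
    simp
  · simp [String.toList_ofList]

lemma pv_pyGet_zero (x : String) (xs : List String) : PySem.List.pyGet? (x :: xs) 0 = some x := by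
  simp [PySem.List.pyGet?, PySem.List.pyIdx?]

-- ===== VERDICT (by name: the statement is the Claim_ definition above) =====
theorem reverse_cFnc_spec : Claim_equal_reverse_cFnc := by
  unfold Claim_equal_reverse_cFnc Spec_reverse_cFnc
  intro s _
  unfold reverse_cFnc reverse_cFnc_alt
  by_cases hs : s = ""
  · subst hs; rfl
  · rw [if_neg hs]
    show (PySem.List.sorted pvRevMap.keys (fun k => PySem.Str.len k) true).foldl
      (fun core_part key => PySem.Str.replace core_part key ((pvRevMap.get? key).getD ""))
      (if PySem.Str.isIn "?" s then
        ((PySem.List.pyGet? ((PySem.Str.split? s "?").getD []) 0).getD "") else s)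
      = String.ofList (pvDecodeB (s.toList.takeWhile (fun c => c ≠ '?')))
    rw [pv_foldA]
    suffices hc : (if PySem.Str.isIn "?" s then
        ((PySem.List.pyGet? ((PySem.Str.split? s "?").getD []) 0).getD "") else s).toList
        = s.toList.takeWhile (fun c => c ≠ '?') by
      rw [hc, pv_chain_eq_decode]
    cases hin : PySem.Str.isIn "?" s with
    | true =>
      rw [if_pos rfl]
      obtain ⟨p0, ps, hsp, hp0⟩ := pv_split_first s
      rw [hsp, Option.getD_some, pv_pyGet_zero, Option.getD_some]
      exact hp0
    | false =>
      rw [if_neg (by simp)]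
      symm
      rw [List.takeWhile_eq_self_iff]
      intro c hcmem
      simp only [ne_eq, decide_eq_true_eq]
      intro hceq
      subst hceq
      have hni : ¬ (['?'] <:+: s.toList) := by
        have := PySem.Str.isIn_iff_infix (sub := "?") (s := s)
        intro hinf
        rw [hin] at this
        simp at this
        exact this hinf
      exact hni ((List.singleton_infix_iff _ _).mpr hcmem)
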